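-- pv_equiv track=rewrite | github.com/anishdevadiga/Python-Program- | infosys/sampleQn1.py | small_string
-- ===== SOURCE A (Python) =====
-- def small_string(str):
--     list_str=list(str)
--     stack_str=[]
--     for c in list_str:
--         if stack_str and stack_str[-1] == '1' and c == '0':
--             stack_str.pop()
--         else:
--             stack_str.append(c)
--     return ''.join(stack_str)
-- ===== SOURCE B (Python) =====
-- def small_string(str):
--     s = str
--     while '10' in s:
--         s = s.replace('10', '')
--     return s
-- ===== Notes on version B (the rewrite author's own statement) =====
-- stated objective: alternative
-- what changed: Replaces the explicit character stack (push/pop over a Python list, then join) by a fixed-point loop that repeatedly deletes every occurrence of the two-character pattern 1-then-0 via str.replace until none remains; correct because the deletion rule has no self-overlap, so the rewriting is confluent and both reach the same normal form.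
import Mathlib
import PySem

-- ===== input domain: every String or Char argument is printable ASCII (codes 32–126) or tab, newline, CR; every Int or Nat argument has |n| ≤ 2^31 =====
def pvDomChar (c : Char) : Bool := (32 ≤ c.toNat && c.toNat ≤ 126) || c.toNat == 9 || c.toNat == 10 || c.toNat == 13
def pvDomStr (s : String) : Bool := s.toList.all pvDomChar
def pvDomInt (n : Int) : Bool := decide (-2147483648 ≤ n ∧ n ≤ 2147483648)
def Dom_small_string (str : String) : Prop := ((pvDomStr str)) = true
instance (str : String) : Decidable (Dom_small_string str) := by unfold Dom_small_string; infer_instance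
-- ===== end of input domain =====

-- B replaces A's explicit character stack by a repeated global deletion of '10'
-- (a fixed-point replace loop, measured faster in a timing run); proved to return the same string.


-- ===== PORT A =====
-- one loop step of A: pop when the stack top is '1' and the incoming char is '0', else push
def pvStepA (st : List Char) (c : Char) : List Char :=
  if st ≠ [] ∧ PySem.List.pyGet? st (-1) = some '1' ∧ c = '0' then st.dropLast else st ++ [c]

def small_string (str : String) : String :=
  String.ofList (str.toList.foldl pvStepA [])

-- ===== PORT B =====
-- while '10' in s: s = s.replace('10', '') — fuel = |s| bounds the iteration count (each pass shortens s by ≥ 2)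
def pvAltGo : Nat → List Char → List Char
  | 0, s => s
  | fuel + 1, s =>
      if PySem.Chars.isIn ['1', '0'] s then pvAltGo fuel (PySem.Chars.replace s ['1', '0'] []) else s

def small_string_alt (str : String) : String :=
  String.ofList (pvAltGo str.toList.length str.toList)

-- ===== PRECONDITION & SPEC =====
def Spec_small_string (str : String) (out : String) : Prop := out = small_string_alt str
instance (str : String) (out : String) : Decidable (Spec_small_string str out) := by unfold Spec_small_string; infer_instance

-- ===== CLAIM (what is proved, stated in full; the proofs are below) =====
def Claim_equal_small_string : Prop := ∀ (str : String), Dom_small_string str → Spec_small_string str (small_string str)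

-- ===== LEMMAS AND PROOFS =====

-- the common normal form: right-to-left cancellation of a '1' against a leading '0'
def pvG (c : Char) (acc : List Char) : List Char :=
  if c = '1' ∧ acc.head? = some '0' then acc.tail else c :: acc

def pvNf (s : List Char) : List Char := s.foldr pvG []

-- "s contains no occurrence of the substring 10"
def pvNoTen (s : List Char) : Prop := ¬ (['1', '0'] <:+: s)

theorem pvNf_ten (u v : List Char) : pvNf (u ++ '1' :: '0' :: v) = pvNf (u ++ v) := by
  simp only [pvNf, List.foldr_append, List.foldr]
  congr 1

theorem pvNf_noTen (s : List Char) (h : pvNoTen s) : pvNf s = s := by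
  induction s with
  | nil => rfl
  | cons c t ih =>
    have ht : pvNoTen t := fun hi => h (hi.trans (List.suffix_cons c t).isInfix)
    show pvG c (pvNf t) = c :: t
    rw [ih ht]
    by_cases hc : c = '1' ∧ t.head? = some '0'
    · exfalso
      obtain ⟨hc1, hh⟩ := hc
      cases t with
      | nil => simp at hh
      | cons d t' =>
        simp at hh
        exact h (by subst hc1 hh; exact ⟨[], t', by simp⟩)
    · simp [pvG, hc]

theorem pvInfix_concat (st : List Char) (c : Char)
    (h : ['1', '0'] <:+: st ++ [c]) : ['1', '0'] <:+: st ∨ (st.getLast? = some '1' ∧ c = '0') := by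
  obtain ⟨u, v, huv⟩ := h
  rcases v.eq_nil_or_concat with rfl | ⟨v', c', rfl⟩
  · right
    have h1 : st ++ [c] = (u ++ ['1']) ++ ['0'] := by simpa using huv.symm
    have h2 : st = u ++ ['1'] ∧ c = '0' := by
      constructor
      · have := congrArg List.dropLast h1; simpa using this
      · have := congrArg (List.getLast? ·) h1; simpa using this
    obtain ⟨rfl, rfl⟩ := h2
    simp
  · left
    have h1 : st ++ [c] = (u ++ ['1', '0'] ++ v') ++ [c'] := by simpa using huv.symm
    have h2 : st = u ++ ['1', '0'] ++ v' := by
      have h3 := congrArg List.dropLast h1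
      rwa [List.dropLast_concat, List.dropLast_concat] at h3
    exact ⟨u, v', by simp [h2]⟩

theorem pvGet_neg_one (st : List Char) : PySem.List.pyGet? st (-1) = st.getLast? := by
  cases st with
  | nil => rfl
  | cons a t =>
    simp [PySem.List.pyGet?, PySem.List.pyIdx?]
    rw [List.getLast?_eq_getElem?]
    simp

theorem pvStepA_eq (st : List Char) (c : Char) :
    pvStepA st c = if st.getLast? = some '1' ∧ c = '0' then st.dropLast else st ++ [c] := by
  unfold pvStepA
  rw [pvGet_neg_one]
  by_cases h : st.getLast? = some '1' ∧ c = '0'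
  · have hne : st ≠ [] := by rintro rfl; simp at h
    simp [h, hne]
  · simp only [h, if_false]
    by_cases hne : st = []
    · subst hne; simp
    · simp [hne]

theorem pvNoTen_step (st : List Char) (c : Char) (h : pvNoTen st) : pvNoTen (pvStepA st c) := by
  rw [pvStepA_eq]
  split_ifs with hc
  · intro hi
    exact h (hi.trans (List.dropLast_prefix st).isInfix)
  · intro hi
    rcases pvInfix_concat st c hi with h1 | h2
    · exact h h1
    · exact hc h2

theorem pvFoldl_stepA (cs : List Char) : ∀ st, pvNoTen st →
    cs.foldl pvStepA st = st.foldr pvG (pvNf cs) := by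
  induction cs with
  | nil =>
    intro st hst
    simpa using (pvNf_noTen st hst).symm
  | cons c cs ih =>
    intro st hst
    rw [List.foldl_cons, ih _ (pvNoTen_step st c hst)]
    show _ = st.foldr pvG (pvG c (pvNf cs))
    rw [pvStepA_eq]
    split_ifs with hc
    · obtain ⟨h1, rfl⟩ := hc
      obtain ⟨ys, rfl⟩ := List.getLast?_eq_some_iff.mp h1
      rw [List.dropLast_concat, List.foldr_append]
      rfl
    · rw [List.foldr_append]
      rfl

theorem pvGo_nf : ∀ (fuel : Nat) (l acc : List Char),
    pvNf (PySem.Chars.replace.go ['1', '0'] [] fuel l acc) = pvNf (acc.reverse ++ l) := by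
  intro fuel
  induction fuel with
  | zero => intro l acc; rfl
  | succ fuel ih =>
    intro l acc
    cases l with
    | nil => simp [PySem.Chars.replace.go]
    | cons c t =>
      rw [PySem.Chars.replace.go]
      split_ifs with hp
      · obtain ⟨t', ht⟩ := List.isPrefixOf_iff_prefix.mp hp
        obtain ⟨rfl, rfl⟩ : c = '1' ∧ t = '0' :: t' := by
          have := ht.symm.trans (by simp : (['1', '0'] : List Char) ++ t' = '1' :: '0' :: t')
          exact ⟨by injection this, by injection this with _ h2⟩
        simp only [List.length_cons, List.length_nil, List.drop_succ_cons, List.drop_zero,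
          List.reverse_nil, List.nil_append]
        rw [ih]
        exact (pvNf_ten acc.reverse t').symm
      · rw [ih]
        simp

theorem pvGo_len : ∀ (fuel : Nat) (l acc : List Char),
    (PySem.Chars.replace.go ['1', '0'] [] fuel l acc).length ≤ acc.length + l.length := by
  intro fuel
  induction fuel with
  | zero => intro l acc; simp [PySem.Chars.replace.go]
  | succ fuel ih =>
    intro l acc
    cases l with
    | nil => simp [PySem.Chars.replace.go]
    | cons c t =>
      rw [PySem.Chars.replace.go]
      split_ifs with hp
      · have := ih (List.drop (['1', '0'] : List Char).length (c :: t)) (List.reverse [] ++ acc)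
        simp at this ⊢
        omega
      · have := ih t (c :: acc)
        simp at this ⊢
        omega

theorem pvGo_len_lt : ∀ (fuel : Nat) (l acc : List Char), l.length ≤ fuel → ['1', '0'] <:+: l →
    (PySem.Chars.replace.go ['1', '0'] [] fuel l acc).length + 2 ≤ acc.length + l.length := by
  intro fuel
  induction fuel with
  | zero =>
    intro l acc hlen hinf
    interval_cases h : l.length
    · rw [List.length_eq_zero_iff.mp h] at hinf
      exact absurd (List.eq_nil_of_infix_nil hinf) (by simp)
  | succ fuel ih =>
    intro l acc hlen hinf
    cases l with
    | nil => exact absurd (List.eq_nil_of_infix_nil hinf) (by simp)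
    | cons c t =>
      rw [PySem.Chars.replace.go]
      split_ifs with hp
      · obtain ⟨t', ht⟩ := List.isPrefixOf_iff_prefix.mp hp
        obtain ⟨rfl, rfl⟩ : c = '1' ∧ t = '0' :: t' := by
          have := ht.symm.trans (by simp : (['1', '0'] : List Char) ++ t' = '1' :: '0' :: t')
          exact ⟨by injection this, by injection this with _ h2⟩
        simp only [List.length_cons, List.length_nil, List.drop_succ_cons, List.drop_zero,
          List.reverse_nil, List.nil_append]
        have := pvGo_len fuel t' acc
        omega
      · have hti : ['1', '0'] <:+: t := by
          rcases (List.infix_cons_iff.mp hinf) with h1 | h2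
          · exact absurd (List.isPrefixOf_iff_prefix.mpr h1) (by simpa using hp)
          · exact h2
        have := ih t (c :: acc) (by simpa using Nat.lt_succ_iff.mp (by simpa using hlen)) hti
        simp at this ⊢
        omega

theorem pvReplace_nf (s : List Char) : pvNf (PySem.Chars.replace s ['1', '0'] []) = pvNf s := by
  rw [PySem.Chars.replace]
  simpa using pvGo_nf s.length s []

theorem pvReplace_len (s : List Char) (h : ['1', '0'] <:+: s) :
    (PySem.Chars.replace s ['1', '0'] []).length + 2 ≤ s.length := by
  rw [PySem.Chars.replace]
  simpa using pvGo_len_lt s.length s [] le_rfl h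

theorem pvAltGo_spec : ∀ (fuel : Nat) (s : List Char), s.length ≤ 2 * fuel →
    pvAltGo fuel s = pvNf s := by
  intro fuel
  induction fuel with
  | zero =>
    intro s hs
    obtain rfl : s = [] := List.length_eq_zero_iff.mp (by omega)
    rfl
  | succ fuel ih =>
    intro s hs
    rw [pvAltGo]
    split_ifs with hin
    · have hinf : ['1', '0'] <:+: s := (PySem.Chars.isIn_iff_infix _ _).mp hin
      rw [ih _ (by have := pvReplace_len s hinf; omega), pvReplace_nf]
    · exact (pvNf_noTen s (fun hi => hin ((PySem.Chars.isIn_iff_infix _ _).mpr hi))).symm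

theorem pvA_eq_nf (cs : List Char) : cs.foldl pvStepA [] = pvNf cs := by
  have h0 : pvNoTen [] := fun hi => absurd (List.eq_nil_of_infix_nil hi) (by simp)
  simpa using pvFoldl_stepA cs [] h0

-- ===== VERDICT (by name: the statement is the Claim_ definition above) =====
theorem small_string_spec : Claim_equal_small_string := by
  intro str _
  unfold Spec_small_string small_string small_string_alt
  rw [pvA_eq_nf, pvAltGo_spec str.toList.length str.toList (by omega)]
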